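-- pv_equiv track=rewrite | github.com/blewis7/clinical-ner-demo | app/app.py | can_merge_between
-- ===== SOURCE A (Python) =====
-- def can_merge_between(line: str, end_a: int, start_b: int) -> bool:
--     """
--     Allow merging if the characters between spans are ignorable.
--     This handles cases like:
--       - within a word: "" (empty)
--       - whitespace: " "
--       - punctuation tokenization: "-" or "/" etc.
--     """
--     if start_b < end_a:
--         # overlapping spans -> treat as mergeable
--         return True
--
--     between = line[end_a:start_b]
--     if between == "":
--         return True
--
--     # merge if between is only whitespace or light punctuation
--     ignorable = set([" ", "\t", "\n", "-", "/", ".", ","])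
--     return all(ch in ignorable for ch in between)
-- ===== SOURCE B (Python) =====
-- def can_merge_between(line: str, end_a: int, start_b: int) -> bool:
--     # Histogram approach: overlapping spans merge; otherwise build a character
--     # count dictionary of the gap in one pass, then the gap is ignorable iff the
--     # total mass of the seven ignorable characters equals the total mass.
--     if start_b < end_a:
--         return True
--     counts = {}
--     for ch in line[end_a:start_b]:
--         counts[ch] = counts.get(ch, 0) + 1
--     return sum(counts.get(c, 0) for c in " \t\n-/.,") == sum(counts.values())
-- ===== Notes on version B (the rewrite author's own statement) =====
-- stated objective: alternative
-- what changed: Replaces A's per-character set-membership all() scan with a histogram: one pass builds a dict of character counts of the gap, then the gap is ignorable iff the summed counts of the seven ignorable characters equal the total count of all characters.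
import Mathlib
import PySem

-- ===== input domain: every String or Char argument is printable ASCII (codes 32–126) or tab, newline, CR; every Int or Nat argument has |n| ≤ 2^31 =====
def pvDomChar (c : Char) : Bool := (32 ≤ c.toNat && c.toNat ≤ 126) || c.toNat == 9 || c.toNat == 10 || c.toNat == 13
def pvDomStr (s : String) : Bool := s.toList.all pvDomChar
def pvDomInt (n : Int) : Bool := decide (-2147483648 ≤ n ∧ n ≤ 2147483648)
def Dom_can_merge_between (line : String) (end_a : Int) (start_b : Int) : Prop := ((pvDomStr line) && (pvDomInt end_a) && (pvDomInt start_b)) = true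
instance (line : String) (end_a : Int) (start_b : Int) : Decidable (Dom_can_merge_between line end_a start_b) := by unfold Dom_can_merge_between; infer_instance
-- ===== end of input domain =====

-- B replaces A's per-character membership scan by a histogram: one pass builds a dict of
-- character counts of the gap, then compares the ignorable mass to the total mass (objective:
-- alternative; same cost).

-- ===== PORT A =====
-- Guard for overlap, slice, empty check, then all() over a set of ignorable characters.
def can_merge_between (line : String) (end_a : Int) (start_b : Int) : Bool :=
  if start_b < end_a then
    true
  else
    let between := PySem.Str.slice line (some end_a) (some start_b)
    if between == "" then
      true
    else
      let ignorable : PySem.Set Char := PySem.Set.ofList [' ', '\t', '\n', '-', '/', '.', ',']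
      between.toList.all (fun ch => ignorable.contains ch)

-- ===== PORT B =====
-- B: build counts = {ch: multiplicity} of the gap in one pass, then compare
-- sum(counts.get(c, 0) for c in " \t\n-/.,") with sum(counts.values()).
def can_merge_between_alt (line : String) (end_a : Int) (start_b : Int) : Bool :=
  if start_b < end_a then
    true
  else
    let between := PySem.Str.slice line (some end_a) (some start_b)
    let counts : PySem.Dict Char Int :=
      between.toList.foldl (fun d ch => d.insert ch (d.getD ch 0 + 1)) PySem.Dict.empty
    ((" \t\n-/.," : String).toList.map (fun c => counts.getD c 0)).sum == counts.values.sum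

-- ===== PRECONDITION & SPEC =====
def Spec_can_merge_between (line : String) (end_a : Int) (start_b : Int) (out : Bool) : Prop := out = can_merge_between_alt line end_a start_b
instance (line : String) (end_a : Int) (start_b : Int) (out : Bool) : Decidable (Spec_can_merge_between line end_a start_b out) := by unfold Spec_can_merge_between; infer_instance

-- ===== CLAIM (what is proved, stated in full; the proofs are below) =====
def Claim_equal_can_merge_between : Prop := ∀ (line : String) (end_a : Int) (start_b : Int), Dom_can_merge_between line end_a start_b → Spec_can_merge_between line end_a start_b (can_merge_between line end_a start_b)

-- ===== LEMMAS AND PROOFS =====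

-- Σ_{c ∈ l} (if c == a then 1 else 0) = l.count a, over the integers.
lemma sum_map_ite_beq_eq_count (l : List Char) (a : Char) :
    (l.map (fun c => if c == a then (1 : Int) else 0)).sum = (l.count a : Int) := by
  induction l with
  | nil => simp
  | cons b l ih =>
    rw [List.map_cons, List.sum_cons, List.count_cons, ih]
    by_cases hba : b = a
    · subst hba; simp; omega
    · rw [beq_false_of_ne hba]; simp

-- Summing the counts of cs over a duplicate-free list of characters counts exactly the
-- members of cs that lie in that list.
lemma sum_map_count_eq_countP (cs : List Char) (allowed : List Char) (h : allowed.Nodup) :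
    (allowed.map (fun c => ((cs.count c : Int)))).sum
      = (cs.countP (fun c => allowed.contains c) : Int) := by
  induction cs with
  | nil => simp
  | cons a cs ih =>
    have hcount : ∀ c : Char, ((a :: cs).count c : Int)
        = (cs.count c : Int) + (if c == a then (1 : Int) else 0) := by
      intro c; rw [List.count_cons]
      by_cases hc : c = a
      · subst hc; push_cast [List.count_cons]; simp
      · rw [beq_false_of_ne hc, beq_false_of_ne (Ne.symm hc)]; simp
    have hsplit : (allowed.map (fun c => ((a :: cs).count c : Int))).sum
        = (allowed.map (fun c => (cs.count c : Int))).sum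
          + (allowed.map (fun c => if c == a then (1 : Int) else 0)).sum := by
      rw [← List.sum_map_add]
      exact congrArg List.sum (List.map_congr_left (fun c _ => hcount c))
    rw [hsplit, ih, sum_map_ite_beq_eq_count, List.countP_cons]
    by_cases hm : a ∈ allowed
    · have h1 : allowed.count a = 1 := List.count_eq_one_of_mem h hm
      have hc : allowed.contains a = true := by simpa using hm
      rw [h1, hc]; norm_num
    · have h0 : allowed.count a = 0 := List.count_eq_zero_of_not_mem hm
      have hc : allowed.contains a = false := by simpa using hm
      rw [h0, hc]; norm_num

-- The total mass of the histogram of cs is the length of cs.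
lemma sum_ofList_count_eq_length (cs : List Char) :
    ((PySem.Set.ofList cs).map (fun k => ((cs.count k : Int)))).sum = (cs.length : Int) := by
  rw [sum_map_count_eq_countP cs _ (PySem.Set.nodup_ofList cs)]
  norm_cast
  rw [List.countP_eq_length]
  intro a ha
  simpa [PySem.Set.mem_ofList] using ha

-- ===== VERDICT (by name: the statement is the Claim_ definition above) =====
theorem can_merge_between_spec : Claim_equal_can_merge_between := by
  intro line end_a start_b _
  unfold Spec_can_merge_between can_merge_between can_merge_between_alt
  by_cases h : start_b < end_a
  · simp [h]
  · simp only [if_neg h]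
    set between := PySem.Str.slice line (some end_a) (some start_b) with hb
    set cs := between.toList with hcs
    set allowed : List Char := [' ', '\t', '\n', '-', '/', '.', ','] with hallowed
    have hset : PySem.Set.ofList [' ', '\t', '\n', '-', '/', '.', ','] = allowed := by decide
    have hchars : (" \t\n-/.," : String).toList = allowed := by decide
    -- B's test, rewritten: histogram of cs, the ignorable mass versus the total mass
    have hB : ((((" \t\n-/.," : String).toList.map
          (fun c => (cs.foldl (fun d ch => d.insert ch (d.getD ch 0 + 1))
            (PySem.Dict.empty : PySem.Dict Char Int)).getD c 0)).sum
          == (cs.foldl (fun d ch => d.insert ch (d.getD ch 0 + 1))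
            (PySem.Dict.empty : PySem.Dict Char Int)).values.sum))
        = decide (∀ c ∈ cs, allowed.contains c) := by
      rw [PySem.Dict.foldl_insert_getD_add_one_eq_counter, hchars]
      have hL : (allowed.map (fun c => (PySem.Dict.counter cs).getD c 0)).sum
          = (cs.countP (fun c => allowed.contains c) : Int) := by
        rw [show (allowed.map (fun c => (PySem.Dict.counter cs).getD c 0))
            = (allowed.map (fun c => ((cs.count c : Int)))) from
          List.map_congr_left (fun c _ => PySem.Dict.getD_counter cs c)]
        exact sum_map_count_eq_countP cs _ (by decide)
      have hR : (PySem.Dict.counter cs).values.sum = (cs.length : Int) := by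
        have hv : (PySem.Dict.counter cs).values
            = ((PySem.Set.ofList cs).map (fun k => ((cs.count k : Int)))) := by
          show ((PySem.Dict.counter cs).items.map (·.2)) = _
          rw [PySem.Dict.items_counter]
          simp [List.map_map, Function.comp]
        rw [hv, sum_ofList_count_eq_length]
      rw [hL, hR]
      by_cases hall : ∀ c ∈ cs, allowed.contains c
      · have hlen : cs.countP (fun c => allowed.contains c) = cs.length :=
          List.countP_eq_length.mpr hall
        have hd : decide (∀ c ∈ cs, allowed.contains c = true) = true := decide_eq_true hall
        rw [hlen, hd]; simp
      · have hne : cs.countP (fun c => allowed.contains c) ≠ cs.length := by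
          intro hcontr
          exact hall (List.countP_eq_length.mp hcontr)
        have hd : decide (∀ c ∈ cs, allowed.contains c = true) = false := by
          simpa using hall
        rw [hd]
        simp only [beq_eq_false_iff_ne, ne_eq, Int.natCast_inj]
        exact hne
    -- A's test: empty guard plus all(); it equals the same universal statement
    have hA : (if (between == "") = true then true
          else cs.all (fun ch => (PySem.Set.ofList
            [' ', '\t', '\n', '-', '/', '.', ',']).contains ch))
        = decide (∀ c ∈ cs, allowed.contains c) := by
      by_cases he : between == ""
      · have hnil : cs = [] := by
          have : between = "" := by simpa using he
          simp [hcs, this]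
        simp [he, hnil]
      · rw [if_neg (by simpa using he), hset]
        rw [Bool.eq_iff_iff]
        simp only [List.all_eq_true, decide_eq_true_eq]
        exact ⟨fun h c hc => h c hc, fun h c hc => h c hc⟩
    rw [hA, hB]
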